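-- pv_equiv track=rewrite | github.com/zeynepclktn/CaesarCipher | caesar.py | decryptupperlower
-- ===== SOURCE A (Python) =====
-- def decryptupperlower(text, shiftnumber):
--     # Variable to store the final decrypted result
--     decrypted_result = ""
--
--     # Loop through each character in the text
--     for letter in text:
--         if letter.isalpha():  # Check if the character is alphabetic
--             if letter.islower():  # If it's a lowercase letter
--                 alphabet_start = ord('a')
--             else:  # If it's an uppercase letter
--                 alphabet_start = ord('A')
--             # Find the original position of the shifted letter
--             fn = (ord(letter) - alphabet_start - shiftnumber) % 26
--             # Find the new letter
--             ln = chr(fn + alphabet_start)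
--             # Add the new letter to the final result
--             decrypted_result += ln
--         else:
--             # Add non-alphabetic characters as they are
--             decrypted_result += letter
--
--     return decrypted_result
-- ===== SOURCE B (Python) =====
-- def decryptupperlower(text, shiftnumber):
--     # Build one translation table (char-code -> char-code) from rotated alphabets,
--     # then transform the whole string with a single translate call.
--     lower = 'abcdefghijklmnopqrstuvwxyz'
--     upper = 'ABCDEFGHIJKLMNOPQRSTUVWXYZ'
--     r = (-shiftnumber) % 26
--     table = str.maketrans(lower + upper,
--                           lower[r:] + lower[:r] + upper[r:] + upper[:r])
--     return text.translate(table)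
-- ===== Notes on version B (the rewrite author's own statement) =====
-- stated objective: faster
-- what changed: Replaced A's per-letter branch-and-mod arithmetic with string += accumulation by building one translation table from slice-rotated alphabets (str.maketrans) and transforming the whole text with a single translate call.
import Mathlib
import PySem

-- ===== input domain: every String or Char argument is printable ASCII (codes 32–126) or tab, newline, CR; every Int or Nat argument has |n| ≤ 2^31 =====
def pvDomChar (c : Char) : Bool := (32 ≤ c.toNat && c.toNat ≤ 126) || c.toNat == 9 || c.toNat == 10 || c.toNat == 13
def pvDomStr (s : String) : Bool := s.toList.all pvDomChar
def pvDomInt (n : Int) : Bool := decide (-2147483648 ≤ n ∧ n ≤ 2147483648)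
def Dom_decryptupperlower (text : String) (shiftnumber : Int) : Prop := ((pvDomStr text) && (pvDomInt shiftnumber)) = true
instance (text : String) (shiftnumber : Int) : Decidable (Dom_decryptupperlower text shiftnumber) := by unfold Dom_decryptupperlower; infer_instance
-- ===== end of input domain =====

-- B builds one translation table (char code -> char code) from slice-rotated alphabets and
-- transforms the text by a single table-lookup pass, instead of A's per-letter branch-and-mod
-- arithmetic with string += accumulation.

-- ===== PORT A =====
def decryptupperlower (text : String) (shiftnumber : Int) : String :=
  String.mk (text.toList.foldl (fun acc letter =>
    if PySem.Chars.isalpha letter then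
      let alphabet_start : Int := if PySem.Chars.islower letter then 97 else 65
      let fn : Int := PySem.Int.mod ((letter.toNat : Int) - alphabet_start - shiftnumber) 26
      let ln : Char := Char.ofNat (fn + alphabet_start).toNat
      acc ++ [ln]
    else
      acc ++ [letter]) [])

-- ===== PORT B =====
-- B-side helpers: the two alphabet literals from Source B
def pvLower : List Char := "abcdefghijklmnopqrstuvwxyz".toList
def pvUpper : List Char := "ABCDEFGHIJKLMNOPQRSTUVWXYZ".toList

-- r = (-shiftnumber) % 26
def pvR (shiftnumber : Int) : Int := PySem.Int.mod (-shiftnumber) 26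

-- lower[r:] + lower[:r] + upper[r:] + upper[:r]  (the maketrans target string)
def pvDst (shiftnumber : Int) : List Char :=
  PySem.List.slice pvLower (some (pvR shiftnumber)) none ++ PySem.List.slice pvLower none (some (pvR shiftnumber))
    ++ PySem.List.slice pvUpper (some (pvR shiftnumber)) none ++ PySem.List.slice pvUpper none (some (pvR shiftnumber))

-- str.maketrans(x, y) = {ord(x[i]): ord(y[i]) for i}  (a dict from codes to codes)
def pvTable (shiftnumber : Int) : PySem.Dict Int Int :=
  PySem.Dict.ofList (List.zip ((pvLower ++ pvUpper).map (fun c => (c.toNat : Int)))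
                              ((pvDst shiftnumber).map (fun c => (c.toNat : Int))))

-- text.translate(table): look each character's code up, identity when absent
def decryptupperlower_alt (text : String) (shiftnumber : Int) : String :=
  String.mk (text.toList.map (fun c =>
    match (pvTable shiftnumber).get? ((c.toNat : Int)) with
    | some n => Char.ofNat n.toNat
    | none => c))

-- ===== PRECONDITION & SPEC =====
def Spec_decryptupperlower (text : String) (shiftnumber : Int) (out : String) : Prop := out = decryptupperlower_alt text shiftnumber
instance (text : String) (shiftnumber : Int) (out : String) : Decidable (Spec_decryptupperlower text shiftnumber out) := by unfold Spec_decryptupperlower; infer_instance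

-- ===== CLAIM =====
def Claim_equal_decryptupperlower : Prop := ∀ (text : String) (shiftnumber : Int), Dom_decryptupperlower text shiftnumber → Spec_decryptupperlower text shiftnumber (decryptupperlower text shiftnumber)

-- ===== LEMMAS AND PROOFS =====

-- the source codes of the table, characterized by index
theorem pv_src_getD : ∀ j < 52,
    ((pvLower ++ pvUpper).map (fun c => (c.toNat : Int))).getD j 0
      = if j < 26 then (97 + j : Int) else (39 + j : Int) := by decide

theorem pv_src_len : ((pvLower ++ pvUpper).map (fun c => (c.toNat : Int))).length = 52 := by decide

theorem pv_src_nodup : ((pvLower ++ pvUpper).map (fun c => (c.toNat : Int))).Nodup := by decide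

theorem pv_src_range : ∀ x ∈ (pvLower ++ pvUpper).map (fun c => (c.toNat : Int)),
    (97 ≤ x ∧ x ≤ 122) ∨ (65 ≤ x ∧ x ≤ 90) := by decide

-- the rotated lower/upper pieces, characterized by index
theorem pv_lrot_getD : ∀ r < 26, ∀ k < 26,
    ((pvLower.drop r ++ pvLower.take r).map (fun c => (c.toNat : Int))).getD k 0
      = 97 + (((r + k) % 26 : Nat) : Int) := by decide

theorem pv_urot_getD : ∀ r < 26, ∀ k < 26,
    ((pvUpper.drop r ++ pvUpper.take r).map (fun c => (c.toNat : Int))).getD k 0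
      = 65 + (((r + k) % 26 : Nat) : Int) := by decide

theorem pv_lrot_len (r : Nat) (hr : r < 26) :
    ((pvLower.drop r ++ pvLower.take r).map (fun c => (c.toNat : Int))).length = 26 := by
  simp [pvLower]; omega

theorem pv_urot_len (r : Nat) (hr : r < 26) :
    ((pvUpper.drop r ++ pvUpper.take r).map (fun c => (c.toNat : Int))).length = 26 := by
  simp [pvUpper]; omega

theorem pvR_nonneg (s : Int) : 0 ≤ pvR s := PySem.Int.mod_nonneg _ (by omega)

theorem pvR_lt (s : Int) : pvR s < 26 := PySem.Int.mod_lt _ (by omega)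

theorem pvR_toNat_lt (s : Int) : (pvR s).toNat < 26 := by
  have := pvR_lt s; have := pvR_nonneg s; omega

-- the slice expression of pvDst in drop/take form
theorem pv_dst_eq (s : Int) :
    pvDst s = ((pvLower.drop (pvR s).toNat ++ pvLower.take (pvR s).toNat)
        ++ (pvUpper.drop (pvR s).toNat ++ pvUpper.take (pvR s).toNat)) := by
  have h0 := pvR_nonneg s
  have hc : pvR s = (((pvR s).toNat : Nat) : Int) := by omega
  unfold pvDst
  rw [hc, PySem.List.slice_from_natCast, PySem.List.slice_to_natCast,
      PySem.List.slice_from_natCast, PySem.List.slice_to_natCast]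
  simp [List.append_assoc, max_eq_left h0]

theorem pv_dst_len (s : Int) : ((pvDst s).map (fun c => (c.toNat : Int))).length = 52 := by
  rw [pv_dst_eq s, List.map_append, List.length_append,
      pv_lrot_len _ (pvR_toNat_lt s), pv_urot_len _ (pvR_toNat_lt s)]

-- items of the translation table are exactly the zipped code lists
theorem pv_table_items (s : Int) :
    (pvTable s).items = List.zip ((pvLower ++ pvUpper).map (fun c => (c.toNat : Int)))
                                 ((pvDst s).map (fun c => (c.toNat : Int))) := by
  have hdef : pvTable s
      = List.foldl (fun (d : PySem.Dict Int Int) (p : Int × Int) => d.insert p.1 p.2)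
          PySem.Dict.empty
          (List.zip ((pvLower ++ pvUpper).map (fun c => (c.toNat : Int)))
                    ((pvDst s).map (fun c => (c.toNat : Int)))) := rfl
  rw [hdef]
  have := PySem.Dict.items_foldl_insert_fresh
    (l := List.zip ((pvLower ++ pvUpper).map (fun c => (c.toNat : Int)))
                   ((pvDst s).map (fun c => (c.toNat : Int))))
    (k := Prod.fst) (v := Prod.snd) (d := PySem.Dict.empty)
    (by intro a _; exact PySem.Dict.contains_empty _)
    (by
      rw [List.map_fst_zip]
      · exact pv_src_nodup
      · rw [pv_src_len, pv_dst_len s])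
  simpa using this

theorem pv_keys_eq (s : Int) :
    (pvTable s).keys = (pvLower ++ pvUpper).map (fun c => (c.toNat : Int)) := by
  show (pvTable s).items.map Prod.fst = _
  rw [pv_table_items, List.map_fst_zip]
  rw [pv_src_len, pv_dst_len s]

-- lookup of the table at index j of the source alphabet
theorem pv_get_at (s : Int) (j : Nat) (hj : j < 52) :
    (pvTable s).get? (((pvLower ++ pvUpper).map (fun c => (c.toNat : Int))).getD j 0)
      = some (((pvDst s).map (fun c => (c.toNat : Int))).getD j 0) := by
  have hlen := pv_dst_len s
  have hjs : j < ((pvLower ++ pvUpper).map (fun c => (c.toNat : Int))).length := by rw [pv_src_len]; omega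
  have hjd : j < ((pvDst s).map (fun c => (c.toNat : Int))).length := by rw [hlen]; omega
  have hjz : j < (List.zip ((pvLower ++ pvUpper).map (fun c => (c.toNat : Int)))
                           ((pvDst s).map (fun c => (c.toNat : Int)))).length := by
    rw [List.length_zip, pv_src_len, hlen]; omega
  have hmem : (((pvLower ++ pvUpper).map (fun c => (c.toNat : Int)))[j]'hjs,
               ((pvDst s).map (fun c => (c.toNat : Int)))[j]'hjd)
      ∈ (pvTable s).items := by
    rw [pv_table_items]
    have := List.getElem_zip (l := (pvLower ++ pvUpper).map (fun c => (c.toNat : Int)))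
      (l' := (pvDst s).map (fun c => (c.toNat : Int))) (i := j) (h := hjz)
    rw [← this]
    exact List.getElem_mem hjz
  have hnd : (pvTable s).keys.Nodup := by rw [pv_keys_eq]; exact pv_src_nodup
  have := PySem.Dict.get?_of_mem_items _ hmem hnd
  rwa [List.getD_eq_getElem _ _ hjs, List.getD_eq_getElem _ _ hjd]

-- the value stored at index j, as a closed formula
theorem pv_dst_getD (s : Int) (j : Nat) (hj : j < 52) :
    ((pvDst s).map (fun c => (c.toNat : Int))).getD j 0
      = (if j < 26 then (97:Int) else 65)
        + ((((pvR s).toNat + (if j < 26 then j else j - 26)) % 26 : Nat) : Int) := by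
  have hr := pvR_toNat_lt s
  rw [pv_dst_eq s, List.map_append]
  by_cases h : j < 26
  · rw [List.getD_append _ _ _ _ (by rw [pv_lrot_len _ hr]; omega)]
    simp only [if_pos h]
    exact pv_lrot_getD _ hr j h
  · have h26 : j - 26 < 26 := by omega
    have hlen := pv_lrot_len (pvR s).toNat hr
    rw [List.getD_append_right _ _ _ _ (by omega)]
    rw [hlen]
    simp only [if_neg h]
    exact pv_urot_getD _ hr (j - 26) h26

-- per-character agreement of the two steps
theorem pv_char_step (s : Int) (c : Char) :
    (if PySem.Chars.isalpha c then
      Char.ofNat (PySem.Int.mod ((c.toNat : Int) - (if PySem.Chars.islower c then (97:Int) else 65) - s) 26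
        + (if PySem.Chars.islower c then (97:Int) else 65)).toNat
    else c)
    = (match (pvTable s).get? ((c.toNat : Int)) with
       | some n => Char.ofNat n.toNat
       | none => c) := by
  have hrpos := pvR_nonneg s
  have hrlt := pvR_lt s
  have hm : ∀ a : Int, PySem.Int.mod a 26 = a % 26 :=
    fun a => PySem.Int.mod_eq_emod_of_pos (by omega)
  have hrdef : pvR s = PySem.Int.mod (-s) 26 := rfl
  have hle : ∀ a b : Char, (a ≤ b) ↔ a.toNat ≤ b.toNat := fun a b => Iff.rfl
  by_cases hlo : 97 ≤ c.toNat ∧ c.toNat ≤ 122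
  · -- lowercase letter: table hit at index k = c.toNat - 97
    have hl : PySem.Chars.islower c = true := by
      simp [PySem.Chars.islower, hle]; omega
    have ha : PySem.Chars.isalpha c = true := by
      simp [PySem.Chars.isalpha, hl]
    set k : Nat := c.toNat - 97 with hk
    have hk26 : k < 26 := by omega
    have hkey : ((pvLower ++ pvUpper).map (fun c => (c.toNat : Int))).getD k 0 = (c.toNat : Int) := by
      rw [pv_src_getD k (by omega)]
      simp only [if_pos hk26]; omega
    have hget := pv_get_at s k (by omega)
    rw [hkey] at hget
    rw [if_pos ha, if_pos hl, hget]
    simp only []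
    congr 1
    rw [pv_dst_getD s k (by omega)]
    simp only [if_pos hk26]
    rw [hrdef, hm] at hrpos hrlt ⊢
    simp only [hm]
    omega
  · by_cases hup : 65 ≤ c.toNat ∧ c.toNat ≤ 90
    · -- uppercase letter: table hit at index 26 + (c.toNat - 65)
      have hl : PySem.Chars.islower c = false := by
        simp [PySem.Chars.islower, hle]; omega
      have ha : PySem.Chars.isalpha c = true := by
        simp [PySem.Chars.isalpha, PySem.Chars.isupper, PySem.Chars.islower, hle]; omega
      set j : Nat := 26 + (c.toNat - 65) with hj
      have hj52 : j < 52 := by omega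
      have hkey : ((pvLower ++ pvUpper).map (fun c => (c.toNat : Int))).getD j 0 = (c.toNat : Int) := by
        rw [pv_src_getD j hj52]
        simp only [if_neg (by omega : ¬ j < 26)]; omega
      have hget := pv_get_at s j hj52
      rw [hkey] at hget
      rw [if_pos ha, if_neg (by simp [hl]), hget]
      simp only []
      congr 1
      rw [pv_dst_getD s j hj52]
      simp only [if_neg (by omega : ¬ j < 26)]
      rw [hrdef, hm] at hrpos hrlt ⊢
      simp only [hm]
      omega
    · -- not a letter: no key matches, translate is the identity
      have ha : PySem.Chars.isalpha c = false := by
        simp [PySem.Chars.isalpha, PySem.Chars.isupper, PySem.Chars.islower, hle]; omega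
      have hnone : (pvTable s).get? ((c.toNat : Int)) = none := by
        rw [PySem.Dict.get?_eq_none_iff_not_mem_keys, pv_keys_eq]
        intro hmem
        rcases pv_src_range _ hmem with h | h <;> omega
      rw [if_neg (by simp [ha]), hnone]

-- ===== VERDICT =====
theorem decryptupperlower_spec : Claim_equal_decryptupperlower := by
  intro text s _
  unfold Spec_decryptupperlower decryptupperlower decryptupperlower_alt
  congr 1
  have hmerge : ∀ (acc : List Char),
      text.toList.foldl (fun acc letter =>
        if PySem.Chars.isalpha letter then
          let alphabet_start : Int := if PySem.Chars.islower letter then 97 else 65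
          let fn : Int := PySem.Int.mod ((letter.toNat : Int) - alphabet_start - s) 26
          let ln : Char := Char.ofNat (fn + alphabet_start).toNat
          acc ++ [ln]
        else acc ++ [letter]) acc
      = acc ++ text.toList.map (fun letter =>
          if PySem.Chars.isalpha letter then
            Char.ofNat (PySem.Int.mod ((letter.toNat : Int) - (if PySem.Chars.islower letter then (97:Int) else 65) - s) 26
              + (if PySem.Chars.islower letter then (97:Int) else 65)).toNat
          else letter) := by
    induction text.toList with
    | nil => simp
    | cons x xs ih =>
      intro acc
      simp only [List.foldl_cons, List.map_cons]
      rw [ih]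
      by_cases h : PySem.Chars.isalpha x = true
      · simp [h]
      · simp [h]
  rw [hmerge []]
  simp only [List.nil_append]
  exact List.map_congr_left (fun c _ => pv_char_step s c)
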